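-- pv_equiv track=rewrite | github.com/VectorASD/optimizer | utils.py | bits_by_index
-- ===== SOURCE A (Python) =====
-- def bits_by_index(index, mask):
--     if not mask: return "\u2205"
--     out = []
--     while mask:
--         lsb = mask & -mask
--         out.append(index[lsb.bit_length() - 1])
--         mask ^= lsb
--     return ", ".join(f"({', '.join(map(str, d))})"
--                      if type(d) in (tuple, list) else str(d)
--                      for d in out)
-- ===== SOURCE B (Python) =====
-- def bits_by_index(index, mask):
--     if not mask: return "\u2205"
--     out = [index[i] for i in range(mask.bit_length()) if mask >> i & 1]
--     return ", ".join(f"({', '.join(map(str, d))})"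
--                      if type(d) in (tuple, list) else str(d)
--                      for d in out)
-- ===== Notes on version B (the rewrite author's own statement) =====
-- stated objective: idiomatic
-- what changed: Replaces the destructive lowest-set-bit extraction loop (mask & -mask, bit_length, xor-clear) with a single positional scan over range(mask.bit_length()) using a shift-and-test comprehension; the empty-mask guard and the join/formatting line are kept verbatim.
import Mathlib
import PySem

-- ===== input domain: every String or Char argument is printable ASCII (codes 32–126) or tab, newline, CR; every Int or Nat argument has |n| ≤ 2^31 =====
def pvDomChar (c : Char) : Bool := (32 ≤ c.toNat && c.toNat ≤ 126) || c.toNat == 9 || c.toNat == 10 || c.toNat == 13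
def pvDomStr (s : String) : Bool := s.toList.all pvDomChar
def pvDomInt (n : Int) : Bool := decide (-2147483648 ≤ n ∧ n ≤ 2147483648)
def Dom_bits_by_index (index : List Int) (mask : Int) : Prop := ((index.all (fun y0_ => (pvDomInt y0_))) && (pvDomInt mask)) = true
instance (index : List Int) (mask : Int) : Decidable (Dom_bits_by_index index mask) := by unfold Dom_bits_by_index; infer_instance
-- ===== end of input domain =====

-- B replaces A's destructive lowest-set-bit extraction loop (mask & -mask / bit_length / xor-clear)
-- by an idiomatic positional scan over range(mask.bit_length()) with a shift-and-test; the guard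
-- and the join/formatting line are kept verbatim, so B returns A's value wherever A returns (Pre_).

-- ===== PORT A =====
-- A's while-loop: state (mask, out); fuel = mask.natAbs bounds the iteration count
-- (each iteration strictly clears one set bit of a positive mask).  Python's index[...]
-- raises IndexError out of range — those inputs are excluded by Pre_, so pyGetD's
-- default is never reached on admitted inputs.
def bitsLoopA (index : List Int) : Nat → Int → List Int → List Int
  | 0, _, out => out
  | fuel+1, mask, out =>
    if mask = 0 then out
    else
      let lsb := PySem.Int.band mask (-mask)
      bitsLoopA index fuel (PySem.Int.bxor mask lsb)
        (out ++ [PySem.List.pyGetD index ((PySem.Int.bitLength lsb : Int) - 1) 0])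

def bits_by_index (index : List Int) (mask : Int) : String :=
  if mask = 0 then "∅"
  else
    -- the join: entries are ints (List Int), so the tuple/list branch of the Python
    -- formatting generator is dead here and every d is formatted by str(d)
    PySem.Str.join ", " ((bitsLoopA index mask.natAbs mask []).map (fun d => PySem.Int.toStr d))

-- ===== PORT B =====
def bits_by_index_alt (index : List Int) (mask : Int) : String :=
  if mask = 0 then "∅"
  else
    -- out = [index[i] for i in range(mask.bit_length()) if mask >> i & 1]
    let out := ((PySem.List.pyRange 0 (PySem.Int.bitLength mask : Int) 1).filter
          (fun i => PySem.Int.band (mask >>> i.toNat) 1 == 1)).map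
        (fun i => PySem.List.pyGetD index i 0)
    -- the join/formatting generator, verbatim from A; tuple/list branch dead under List Int
    PySem.Str.join ", " (out.map (fun d => PySem.Int.toStr d))

-- ===== PRECONDITION & SPEC =====
-- exactly the inputs on which Python A returns: a negative mask drives A's loop past every
-- bit of index (IndexError), and a nonnegative mask with a set bit at position ≥ len(index)
-- hits index[...] out of range (IndexError)
def Pre_bits_by_index (index : List Int) (mask : Int) : Prop :=
  0 ≤ mask ∧ mask < 2 ^ index.length
instance (index : List Int) (mask : Int) : Decidable (Pre_bits_by_index index mask) := by
  unfold Pre_bits_by_index; infer_instance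
def pvWitness_bits_by_index : List Int × Int := ([10, 20, 30], 5)

def Spec_bits_by_index (index : List Int) (mask : Int) (out : String) : Prop := out = bits_by_index_alt index mask
instance (index : List Int) (mask : Int) (out : String) : Decidable (Spec_bits_by_index index mask out) := by unfold Spec_bits_by_index; infer_instance

-- ===== CLAIM (what is proved, stated in full; the proofs are below) =====
def Claim_equal_bits_by_index : Prop := ∀ (index : List Int) (mask : Int), Dom_bits_by_index index mask → Pre_bits_by_index index mask → Spec_bits_by_index index mask (bits_by_index index mask)

-- ===== LEMMAS AND PROOFS =====

-- set-bit positions of m below bound B, in increasing order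
def posUpTo (m B : Nat) : List Nat := (List.range B).filter (m.testBit)

theorem testBit_decomp (t q i : Nat) :
    (2 ^ (t+1) * q + 2 ^ t).testBit i =
      (if i < t + 1 then decide (t = i) else q.testBit (i - (t+1))) := by
  rw [Nat.testBit_two_pow_mul_add _ (Nat.pow_lt_pow_succ (by norm_num)) i]
  split_ifs with h
  · exact Nat.testBit_two_pow
  · rfl

theorem testBit_decomp' (t q i : Nat) :
    (2 ^ (t+1) * q).testBit i =
      (if i < t + 1 then false else q.testBit (i - (t+1))) := by
  have := Nat.testBit_two_pow_mul_add q (b := 0) (i := t+1) (by positivity) i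
  simpa using this

theorem posUpTo_bound_irrel (m B B' : Nat) (hB : B ≤ B') (h : m < 2 ^ B) :
    posUpTo m B' = posUpTo m B := by
  unfold posUpTo
  obtain ⟨k, rfl⟩ := Nat.exists_eq_add_of_le hB
  rw [List.range_add, List.filter_append]
  have : (List.filter m.testBit ((List.range k).map (B + ·))) = [] := by
    rw [List.filter_eq_nil_iff]
    intro a ha
    simp only [List.mem_map, List.mem_range] at ha
    obtain ⟨j, _, rfl⟩ := ha
    simp [Nat.testBit_eq_false_of_lt (lt_of_lt_of_le h (Nat.pow_le_pow_right (by norm_num) (Nat.le_add_right B j)))]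
  simp [this]

theorem posUpTo_cons (t q B : Nat) (hB : t < B) :
    posUpTo (2 ^ (t+1) * q + 2 ^ t) B = t :: posUpTo (2 ^ (t+1) * q) B := by
  unfold posUpTo
  obtain ⟨k, rfl⟩ := Nat.exists_eq_add_of_le (Nat.succ_le_of_lt hB)
  rw [List.range_add, List.filter_append, List.filter_append]
  have h1 : (List.range (t+1)).filter (2 ^ (t+1) * q + 2 ^ t).testBit = [t] := by
    rw [List.range_succ, List.filter_append]
    have : (List.range t).filter (2 ^ (t+1) * q + 2 ^ t).testBit = [] := by
      rw [List.filter_eq_nil_iff]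
      intro a ha
      simp only [List.mem_range] at ha
      simp [testBit_decomp, Nat.lt_succ_of_lt ha, Nat.ne_of_gt ha]
    simp [this, testBit_decomp]
  have h2 : (List.range (t+1)).filter (2 ^ (t+1) * q).testBit = [] := by
    rw [List.filter_eq_nil_iff]
    intro a ha
    simp only [List.mem_range] at ha
    simp [testBit_decomp', ha]
  have h3 : ∀ a ∈ (List.range k).map (t + 1 + ·),
      (2 ^ (t+1) * q + 2 ^ t).testBit a = (2 ^ (t+1) * q).testBit a := by
    intro a ha
    simp only [List.mem_map, List.mem_range] at ha
    obtain ⟨j, _, rfl⟩ := ha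
    have hlt : ¬ (t + 1 + j < t + 1) := by omega
    have e : t + 1 + j - (t + 1) = j := by omega
    rw [testBit_decomp, testBit_decomp', if_neg hlt, if_neg hlt, e]
  rw [h1, h2, List.filter_congr h3]
  rfl

theorem bitLength_two_pow (t : Nat) :
    PySem.Int.bitLength ((2 ^ t : Nat) : Int) = t + 1 := by
  induction t with
  | zero => rw [PySem.Int.bitLength_natCast (by norm_num)]; simp [PySem.Int.bitLength_zero]
  | succ t ih =>
    rw [PySem.Int.bitLength_natCast (by positivity)]
    rw [pow_succ, Nat.mul_div_cancel _ (by norm_num)] at *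
    omega

theorem band_pos_neg (m : Nat) (h : 0 < m) :
    PySem.Int.band (m : Int) (-(m : Int)) = ((m - (m &&& (m-1)) : Nat) : Int) := by
  unfold PySem.Int.band
  rw [if_pos (by positivity), if_neg (by omega), neg_neg]
  have h1 : ((m : Int)).toNat = m := by omega
  have h2 : ((m : Int) - 1).toNat = m - 1 := by omega
  rw [h2, h1]

theorem bxor_nonneg (a b : Nat) : PySem.Int.bxor (a : Int) (b : Int) = ((a ^^^ b : Nat) : Int) := by
  unfold PySem.Int.bxor
  rw [if_pos (by positivity), if_pos (by positivity)]
  simp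

theorem land_pred (t q : Nat) :
    (2 ^ (t+1) * q + 2 ^ t) &&& (2 ^ (t+1) * q + 2 ^ t - 1) = 2 ^ (t+1) * q := by
  apply Nat.eq_of_testBit_eq
  intro i
  have h0 : 0 < 2 ^ t := Nat.two_pow_pos t
  have hm1 : 2 ^ (t+1) * q + 2 ^ t - 1 = 2 ^ (t+1) * q + (2 ^ t - 1) := by omega
  rw [Nat.testBit_land, testBit_decomp, hm1,
    Nat.testBit_two_pow_mul_add _ (by have := Nat.pow_lt_pow_succ (a := 2) (n := t) (by norm_num); omega) i,
    testBit_decomp']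
  by_cases hi : i < t + 1
  · rw [if_pos hi, if_pos hi, if_pos hi, Nat.testBit_two_pow_sub_one]
    rcases Nat.lt_or_ge i t with h | h
    · simp [Nat.ne_of_gt h, h]
    · have : ¬ (i < t) := by omega
      simp [this]
  · rw [if_neg hi, if_neg hi, if_neg hi, Bool.and_self]

theorem xor_clear (t q : Nat) :
    (2 ^ (t+1) * q + 2 ^ t) ^^^ 2 ^ t = 2 ^ (t+1) * q := by
  apply Nat.eq_of_testBit_eq
  intro i
  rw [Nat.testBit_xor, testBit_decomp, testBit_decomp', Nat.testBit_two_pow]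
  by_cases hi : i < t + 1
  · rw [if_pos hi, if_pos hi]
    by_cases ht : t = i <;> simp [ht]
  · have : ¬ t = i := by omega
    rw [if_neg hi, if_neg hi]
    simp [this]

theorem loopA_eq (index : List Int) (m : Nat) : ∀ fuel, m ≤ fuel → ∀ out,
    bitsLoopA index fuel (m : Int) out
      = out ++ (posUpTo m (PySem.Int.bitLength (m : Int))).map
          (fun i : Nat => PySem.List.pyGetD index (i : Int) 0) := by
  induction m using Nat.strong_induction_on with
  | _ m IH =>
    intro fuel hf out
    rcases Nat.eq_zero_or_pos m with rfl | hm
    · cases fuel <;> simp [bitsLoopA, posUpTo, PySem.Int.bitLength_zero]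
    · obtain ⟨fuel, rfl⟩ : ∃ f, fuel = f + 1 := ⟨fuel - 1, by omega⟩
      obtain ⟨t, r, hodd, hmr⟩ := Nat.exists_eq_two_pow_mul_odd (Nat.pos_iff_ne_zero.mp hm)
      obtain ⟨q, hq⟩ := hodd
      have hm2 : m = 2 ^ (t+1) * q + 2 ^ t := by subst hq; rw [hmr]; ring
      have h2t : 0 < 2 ^ t := Nat.two_pow_pos t
      have hne : ((m : Nat) : Int) ≠ 0 := by exact_mod_cast Nat.pos_iff_ne_zero.mp hm
      have hstep : bitsLoopA index (fuel+1) (m : Int) out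
          = bitsLoopA index fuel (PySem.Int.bxor (m : Int) (PySem.Int.band (m : Int) (-(m : Int))))
              (out ++ [PySem.List.pyGetD index ((PySem.Int.bitLength (PySem.Int.band (m : Int) (-(m : Int))) : Int) - 1) 0]) := by
        rw [bitsLoopA, if_neg hne]
      rw [hstep, band_pos_neg m hm]
      have hlsb : m - (m &&& (m - 1)) = 2 ^ t := by
        rw [hm2, land_pred]; omega
      rw [hlsb, bitLength_two_pow, bxor_nonneg]
      have hxor : m ^^^ 2 ^ t = 2 ^ (t+1) * q := by
        rw [hm2, xor_clear]
      rw [hxor]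
      have hlt : 2 ^ (t+1) * q < m := by omega
      rw [IH _ hlt fuel (by omega)]
      have hidx : ((((t + 1 : Nat) : Int)) - 1) = (t : Int) := by push_cast; ring
      rw [hidx]
      -- bound juggling for posUpTo
      have hmlt : m < 2 ^ PySem.Int.bitLength (m : Int) := by
        have := PySem.Int.lt_two_pow_bitLength (m : Int)
        simpa using this
      have hm'lt : 2 ^ (t+1) * q < 2 ^ PySem.Int.bitLength ((2 ^ (t+1) * q : Nat) : Int) := by
        have := PySem.Int.lt_two_pow_bitLength ((2 ^ (t+1) * q : Nat) : Int)
        simpa using this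
      have hbound : posUpTo (2 ^ (t+1) * q) (PySem.Int.bitLength ((2 ^ (t+1) * q : Nat) : Int))
          = posUpTo (2 ^ (t+1) * q) (PySem.Int.bitLength (m : Int)) := by
        rcases le_total (PySem.Int.bitLength ((2 ^ (t+1) * q : Nat) : Int)) (PySem.Int.bitLength (m : Int)) with h | h
        · rw [posUpTo_bound_irrel _ _ _ h hm'lt]
        · rw [posUpTo_bound_irrel _ _ _ h (lt_trans hlt hmlt)]
      have ht_lt : t < PySem.Int.bitLength (m : Int) := by
        have : 2 ^ t ≤ m := by omega
        have h2 : 2 ^ t < 2 ^ PySem.Int.bitLength (m : Int) := lt_of_le_of_lt this hmlt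
        exact (Nat.pow_lt_pow_iff_right (by norm_num)).mp h2
      have hcons : posUpTo m (PySem.Int.bitLength (m : Int))
          = t :: posUpTo (2 ^ (t+1) * q) (PySem.Int.bitLength (m : Int)) := by
        rw [hm2]; exact posUpTo_cons t q _ (by rw [← hm2]; exact ht_lt)
      rw [hbound, hcons]
      simp

theorem band_one (a : Nat) : PySem.Int.band ((a : Nat) : Int) 1 = ((a &&& 1 : Nat) : Int) := by
  unfold PySem.Int.band
  rw [if_pos (by positivity), if_pos (by norm_num)]
  simp

theorem cond_eq (m k : Nat) :
    (PySem.Int.band ((m : Int) >>> k) 1 == 1) = m.testBit k := by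
  have h2 : (m : Int) >>> k = ((m >>> k : Nat) : Int) := (Int.natCast_shiftRight m k).symm
  rw [h2, band_one]
  have h4 : ((((m >>> k) &&& 1 : Nat) : Int) == 1) = (((m >>> k) &&& 1 : Nat) == 1) := by
    rw [Nat.and_one_is_mod]
    rcases Nat.mod_two_eq_zero_or_one (m >>> k) with h | h <;> rw [h] <;> decide
  rw [h4]
  have h5 : m.testBit k = ((m >>> k) &&& 1 == 1) := by
    simp [Nat.testBit, Nat.and_one_is_mod]
  exact h5.symm

theorem bits_by_index_spec' (index : List Int) (mask : Int) (h0 : 0 ≤ mask) :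
    bits_by_index index mask = bits_by_index_alt index mask := by
  by_cases hz : mask = 0
  · simp [bits_by_index, bits_by_index_alt, hz]
  · obtain ⟨m, rfl⟩ : ∃ m : Nat, mask = (m : Int) := ⟨mask.toNat, by omega⟩
    rw [bits_by_index, bits_by_index_alt, if_neg hz, if_neg hz]
    have hna : ((m : Int)).natAbs = m := Int.natAbs_natCast m
    rw [hna, loopA_eq index m m le_rfl []]
    congr 1
    rw [PySem.List.pyRange_zero_nat, List.filter_map]
    have hp : ∀ k, ((fun i : Int => PySem.Int.band (@HShiftRight.hShiftRight Int Int Int (@instHShiftRightOfShiftRight Int Int.instShiftRight_mathlib) (m : Int) ((i.toNat : Nat) : Int)) 1 == 1) ∘ (fun k : Nat => (k : Int))) k = m.testBit k := by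
      intro k
      simp only [Function.comp_apply, Int.toNat_natCast]
      rw [Int.shiftRight_natCast]
      exact cond_eq m k
    rw [List.filter_congr (fun k _ => hp k)]
    simp only [posUpTo]
    simp [List.map_map, Function.comp_def, PySem.List.pyGetD_natCast]

-- ===== VERDICT (by name: the statement is the Claim_ definition above) =====
theorem bits_by_index_spec : Claim_equal_bits_by_index := by
  intro index mask _ hpre
  exact bits_by_index_spec' index mask hpre.1
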